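-- pv_equiv track=rewrite | github.com/hy-xiong/NYC_taxi_hotspots | PyScriptsProcessTaxiRawData/data3hsplit.py | categorizeTaxiTime
-- ===== SOURCE A (Python) =====
-- import csv, collections, os
-- import operator as op
--
-- def categorizeTaxiTime(taxiDataList, startTime, endTime, timeInterval):
--     categorizedTaxiData = collections.defaultdict(list)
--     sortedTaxiDataList = sorted(taxiDataList, key = op.itemgetter(2))
--     currentTime = startTime
--     for taxiRecord in sortedTaxiDataList:
--         if taxiRecord[2] > currentTime:
--             while(taxiRecord[2] > currentTime + timeInterval):
--                 currentTime += timeInterval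
--             if(currentTime < endTime):
--                 categorizedTaxiData[currentTime].append(taxiRecord)
--     return categorizedTaxiData
-- ===== SOURCE B (Python) =====
-- import collections
-- import operator as op
--
--
-- def categorizeTaxiTime(taxiDataList, startTime, endTime, timeInterval):
--     categorizedTaxiData = collections.defaultdict(list)
--     recs = [r for r in sorted(taxiDataList, key=op.itemgetter(2)) if r[2] > startTime]
--
--     def bucket(r):
--         return startTime + ((r[2] - startTime - 1) // timeInterval) * timeInterval
--
--     i, n = 0, len(recs)
--     while i < n:
--         b = bucket(recs[i])
--         j = i + 1
--         while j < n and bucket(recs[j]) == b: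
--             j += 1
--         if b < endTime:
--             categorizedTaxiData[b] = recs[i:j]
--         i = j
--     return categorizedTaxiData
-- ===== Notes on version B (the rewrite author's own statement) =====
-- stated objective: alternative
-- what changed: Instead of A's persistent currentTime pointer advanced by a nested while per record, B filters the sorted list to records past startTime, computes each bucket in closed form, and groups contiguous equal-bucket runs with a two-index scan, bulk-assigning each run to its bucket at once.
import Mathlib
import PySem

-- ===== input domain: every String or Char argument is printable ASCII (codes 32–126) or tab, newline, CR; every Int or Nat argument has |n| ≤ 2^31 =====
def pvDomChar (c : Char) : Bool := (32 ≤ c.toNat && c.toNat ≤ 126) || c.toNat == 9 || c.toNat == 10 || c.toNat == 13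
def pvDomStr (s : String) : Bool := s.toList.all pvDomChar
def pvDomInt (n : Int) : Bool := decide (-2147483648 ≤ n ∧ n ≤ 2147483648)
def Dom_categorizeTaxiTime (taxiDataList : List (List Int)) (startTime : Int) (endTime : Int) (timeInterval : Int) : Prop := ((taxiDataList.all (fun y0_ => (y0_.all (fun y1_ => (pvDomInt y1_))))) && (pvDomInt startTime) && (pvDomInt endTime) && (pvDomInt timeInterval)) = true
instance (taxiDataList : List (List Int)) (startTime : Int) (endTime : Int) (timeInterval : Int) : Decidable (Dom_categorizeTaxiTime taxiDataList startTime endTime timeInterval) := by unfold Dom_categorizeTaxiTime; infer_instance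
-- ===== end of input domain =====

-- B replaces A's persistent currentTime pointer (advanced by a nested while per record) with
-- a filter + closed-form bucket + contiguous-run grouping over the sorted list (alternative decomposition).

-- ===== PORT A =====
-- the `while taxiRecord[2] > currentTime + timeInterval: currentTime += timeInterval` loop;
-- fuel (t - cur).toNat is enough iff timeInterval ≥ 1 (otherwise Python diverges: outside Pre_)
def pvAdvance (fuel : Nat) (t cur ti : Int) : Int :=
  match fuel with
  | 0 => cur
  | fuel + 1 => if cur + ti < t then pvAdvance fuel t (cur + ti) ti else cur

-- one iteration of A's `for taxiRecord in sortedTaxiDataList` body; state = (dict, currentTime)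
def pvStepA (endTime ti : Int) (st : PySem.Dict Int (List (List Int)) × Int) (r : List Int) :
    PySem.Dict Int (List (List Int)) × Int :=
  let t := PySem.List.pyGetD r 2 0
  if st.2 < t then
    let cur := pvAdvance (t - st.2).toNat t st.2 ti
    if cur < endTime then (st.1.modify cur [] (· ++ [r]), cur) else (st.1, cur)
  else st

def categorizeTaxiTime (taxiDataList : List (List Int)) (startTime : Int) (endTime : Int) (timeInterval : Int) : List (Int × List (List Int)) :=
  ((PySem.List.sorted taxiDataList (fun r => PySem.List.pyGetD r 2 0) false).foldl
      (pvStepA endTime timeInterval) (PySem.Dict.empty, startTime)).1.items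

-- ===== PORT B =====
-- Source B's closed-form bucket of a record time t
def pvBucket (startTime ti t : Int) : Int :=
  startTime + (PySem.Int.floordiv (t - startTime - 1) ti) * ti

-- Source B's two-index while scan: each outer step takes the contiguous run recs[i:j] sharing the
-- head's bucket (takeWhile = the inner `while j < n and bucket(recs[j]) == b` scan) and
-- continues from j (dropWhile)
def pvGroups (startTime ti : Int) : List (List Int) → List (Int × List (List Int))
  | [] => []
  | r :: rs =>
      (pvBucket startTime ti (PySem.List.pyGetD r 2 0),
        r :: rs.takeWhile (fun x =>
          pvBucket startTime ti (PySem.List.pyGetD x 2 0) == pvBucket startTime ti (PySem.List.pyGetD r 2 0))) ::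
      pvGroups startTime ti (rs.dropWhile (fun x =>
          pvBucket startTime ti (PySem.List.pyGetD x 2 0) == pvBucket startTime ti (PySem.List.pyGetD r 2 0)))
  termination_by l => l.length
  decreasing_by exact Nat.lt_succ_of_le (List.length_dropWhile_le _ _)

def categorizeTaxiTime_alt (taxiDataList : List (List Int)) (startTime : Int) (endTime : Int) (timeInterval : Int) : List (Int × List (List Int)) :=
  let recs := (PySem.List.sorted taxiDataList (fun r => PySem.List.pyGetD r 2 0) false).filter
      (fun r => decide (startTime < PySem.List.pyGetD r 2 0))
  ((pvGroups startTime timeInterval recs).foldl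
      (fun d bg => if bg.1 < endTime then d.insert bg.1 bg.2 else d) PySem.Dict.empty).items

-- ===== PRECONDITION & SPEC =====
-- Pre_ excludes inputs where Python A raises or diverges: a record shorter than 3 entries
-- (IndexError in the sort key), and timeInterval ≤ 0 together with some record time past
-- startTime (the inner while loop never terminates there).
def Pre_categorizeTaxiTime (taxiDataList : List (List Int)) (startTime : Int) (endTime : Int) (timeInterval : Int) : Prop :=
  (∀ r ∈ taxiDataList, 3 ≤ r.length) ∧
  (0 < timeInterval ∨ ∀ r ∈ taxiDataList, PySem.List.pyGetD r 2 0 ≤ startTime)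
instance (taxiDataList : List (List Int)) (startTime : Int) (endTime : Int) (timeInterval : Int) : Decidable (Pre_categorizeTaxiTime taxiDataList startTime endTime timeInterval) := by unfold Pre_categorizeTaxiTime; infer_instance

def pvWitness_categorizeTaxiTime : List (List Int) × Int × Int × Int :=
  ([[7, 8, 5], [1, 2, 12], [3, 4, 2]], 0, 20, 4)

def Spec_categorizeTaxiTime (taxiDataList : List (List Int)) (startTime : Int) (endTime : Int) (timeInterval : Int) (out : List (Int × List (List Int))) : Prop := out = categorizeTaxiTime_alt taxiDataList startTime endTime timeInterval
instance (taxiDataList : List (List Int)) (startTime : Int) (endTime : Int) (timeInterval : Int) (out : List (Int × List (List Int))) : Decidable (Spec_categorizeTaxiTime taxiDataList startTime endTime timeInterval out) := by unfold Spec_categorizeTaxiTime; infer_instance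

-- ===== CLAIM (what is proved, stated in full; the proofs are below) =====
def Claim_equal_categorizeTaxiTime : Prop := ∀ (taxiDataList : List (List Int)) (startTime : Int) (endTime : Int) (timeInterval : Int), Dom_categorizeTaxiTime taxiDataList startTime endTime timeInterval → Pre_categorizeTaxiTime taxiDataList startTime endTime timeInterval → Spec_categorizeTaxiTime taxiDataList startTime endTime timeInterval (categorizeTaxiTime taxiDataList startTime endTime timeInterval)

-- ===== LEMMAS AND PROOFS =====

-- record key and the per-record intermediate step used by the proofs
def pvKey (r : List Int) : Int := PySem.List.pyGetD r 2 0

def pvStepR (startTime endTime ti : Int) (d : PySem.Dict Int (List (List Int))) (r : List Int) :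
    PySem.Dict Int (List (List Int)) :=
  let b := pvBucket startTime ti (pvKey r)
  if b < endTime then d.modify b [] (· ++ [r]) else d

lemma pvBucket_bounds (startTime ti t : Int) (hti : 0 < ti) (h : startTime < t) :
    startTime ≤ pvBucket startTime ti t ∧ pvBucket startTime ti t < t ∧ t ≤ pvBucket startTime ti t + ti := by
  set q := PySem.Int.floordiv (t - startTime - 1) ti with hq
  have h1 : q * ti ≤ t - startTime - 1 := (PySem.Int.le_floordiv_iff_mul_le hti).mp le_rfl
  have h2 : 0 ≤ q := (PySem.Int.le_floordiv_iff_mul_le hti).mpr (by omega)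
  have h3 : ¬ (q + 1 ≤ q) := by omega
  have h4 : ¬ ((q + 1) * ti ≤ t - startTime - 1) := by
    intro hc; exact h3 ((PySem.Int.le_floordiv_iff_mul_le hti).mpr hc)
  have h5 : 0 ≤ q * ti := mul_nonneg h2 (le_of_lt hti)
  constructor
  · simp only [pvBucket, ← hq]; omega
  constructor
  · simp only [pvBucket, ← hq]; omega
  · simp only [pvBucket, ← hq]; nlinarith

lemma pvBucket_mono (startTime ti t t' : Int) (hti : 0 < ti) (h : t ≤ t') :
    pvBucket startTime ti t ≤ pvBucket startTime ti t' := by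
  have h1 : PySem.Int.floordiv (t - startTime - 1) ti * ti ≤ t - startTime - 1 :=
    (PySem.Int.le_floordiv_iff_mul_le hti).mp le_rfl
  have h2 : PySem.Int.floordiv (t - startTime - 1) ti ≤ PySem.Int.floordiv (t' - startTime - 1) ti :=
    (PySem.Int.le_floordiv_iff_mul_le hti).mpr (by omega)
  have := mul_le_mul_of_nonneg_right h2 (le_of_lt hti)
  simp only [pvBucket]; omega

-- A's while loop lands exactly on B's closed-form bucket.
lemma pvAdvance_eq_bucket (startTime ti : Int) (hti : 0 < ti) :
    ∀ (fuel : Nat) (t cur : Int), cur < t → t - cur ≤ (fuel : Int) →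
      ti ∣ (cur - startTime) → pvAdvance fuel t cur ti = pvBucket startTime ti t := by
  intro fuel
  induction fuel with
  | zero => intro t cur h1 h2 _; exfalso; omega
  | succ n ih =>
    intro t cur h1 h2 hdvd
    unfold pvAdvance
    split
    · exact ih t (cur + ti) (by omega) (by omega)
        (by obtain ⟨k, hk⟩ := hdvd; exact ⟨k + 1, by linarith [hk]⟩)
    · -- t ≤ cur + ti : cur is already the bucket
      obtain ⟨k, hk⟩ := hdvd
      have hfd : PySem.Int.floordiv (t - startTime - 1) ti = k := by
        rw [PySem.Int.floordiv_eq_iff_of_pos hti]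
        constructor <;> nlinarith
      simp only [pvBucket, hfd]; nlinarith

-- records with time ≤ startTime form a prefix of the sorted list and leave A's state untouched,
-- so A's fold equals the fold over the filtered list
lemma pvFoldA_filter (startTime endTime ti : Int) :
    ∀ (l : List (List Int)) (d : PySem.Dict Int (List (List Int))),
      l.Pairwise (fun a b => pvKey a ≤ pvKey b) →
      l.foldl (pvStepA endTime ti) (d, startTime) =
        (l.filter (fun r => decide (startTime < pvKey r))).foldl (pvStepA endTime ti) (d, startTime) := by
  intro l
  induction l with
  | nil => intro d _; rfl
  | cons r rs ih =>
    intro d hpair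
    rw [List.pairwise_cons] at hpair
    obtain ⟨hhead, htail⟩ := hpair
    by_cases hst : startTime < pvKey r
    · have hfr : rs.filter (fun r => decide (startTime < pvKey r)) = rs :=
        List.filter_eq_self.mpr (fun x hx => by
          have := hhead x hx; simp; omega)
      rw [List.filter_cons_of_pos (by simpa using hst), List.foldl_cons, List.foldl_cons, hfr]
    · have hA : pvStepA endTime ti (d, startTime) r = (d, startTime) := by
        simp only [pvStepA, pvKey] at *
        rw [if_neg (by omega)]
      rw [List.filter_cons_of_neg (by simpa using hst), List.foldl_cons, hA]
      exact ih d htail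

-- on the filtered list A's fold is the per-record bucket step (dict component), for ti > 0
lemma pvFoldA_eq_stepR (startTime endTime ti : Int) (hti : 0 < ti) :
    ∀ (l : List (List Int)) (d : PySem.Dict Int (List (List Int))) (cur : Int),
      l.Pairwise (fun a b => pvKey a ≤ pvKey b) →
      startTime ≤ cur → ti ∣ (cur - startTime) →
      (∀ r ∈ l, startTime < pvKey r) →
      (∀ r ∈ l, cur < pvKey r) →
      (l.foldl (pvStepA endTime ti) (d, cur)).1 = l.foldl (pvStepR startTime endTime ti) d := by
  intro l
  induction l with
  | nil => intro d cur _ _ _ _ _; rfl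
  | cons r rs ih =>
    intro d cur hpair hle hdvd hst hlt
    rw [List.pairwise_cons] at hpair
    obtain ⟨hhead, htail⟩ := hpair
    have hstr : startTime < pvKey r := hst r (by simp)
    have hcur : cur < pvKey r := hlt r (by simp)
    obtain ⟨hb1, hb2, _⟩ := pvBucket_bounds startTime ti (pvKey r) hti hstr
    have hadv : pvAdvance (pvKey r - cur).toNat (pvKey r) cur ti = pvBucket startTime ti (pvKey r) :=
      pvAdvance_eq_bucket startTime ti hti _ (pvKey r) cur hcur (by omega) hdvd
    have hstepA : pvStepA endTime ti (d, cur) r =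
        (pvStepR startTime endTime ti d r, pvBucket startTime ti (pvKey r)) := by
      simp only [pvStepA, pvStepR, pvKey] at hadv hcur ⊢
      rw [if_pos hcur, hadv]
      by_cases hbe : pvBucket startTime ti (PySem.List.pyGetD r 2 0) < endTime <;> simp [hbe]
    rw [List.foldl_cons, List.foldl_cons, hstepA]
    obtain ⟨k, hk⟩ : ti ∣ (cur - startTime) := hdvd
    exact ih _ _ htail hb1
      ⟨PySem.Int.floordiv (pvKey r - startTime - 1) ti, by simp only [pvBucket]; ring⟩
      (fun x hx => hst x (by simp [hx]))
      (fun x hx => lt_of_lt_of_le hb2 (hhead x hx))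

-- appending the records of a run one by one into an already-present key = one bulk insert
lemma pvRun_fold (startTime endTime ti b : Int) (hbe : b < endTime) :
    ∀ (run : List (List Int)) (d : PySem.Dict Int (List (List Int))) (v : List (List Int)),
      (∀ x ∈ run, pvBucket startTime ti (pvKey x) = b) →
      run.foldl (pvStepR startTime endTime ti) (d.insert b v) = d.insert b (v ++ run) := by
  intro run
  induction run with
  | nil => intro d v _; simp
  | cons x run ih =>
    intro d v hall
    have hbx : pvBucket startTime ti (pvKey x) = b := hall x (by simp)
    rw [List.foldl_cons]
    have hstep : pvStepR startTime endTime ti (d.insert b v) x = d.insert b (v ++ [x]) := by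
      simp only [pvStepR, hbx, if_pos hbe]
      show (d.insert b v).insert b ((d.insert b v).getD b [] ++ [x]) = _
      rw [PySem.Dict.getD_insert_self, PySem.Dict.insert_insert_self]
    rw [hstep, ih d (v ++ [x]) (fun y hy => hall y (by simp [hy]))]
    simp


-- a run whose bucket is past endTime leaves the dict untouched
lemma pvRun_fold_skip (startTime endTime ti b : Int) (hbe : ¬ b < endTime) :
    ∀ (run : List (List Int)) (d : PySem.Dict Int (List (List Int))),
      (∀ x ∈ run, pvBucket startTime ti (pvKey x) = b) →
      run.foldl (pvStepR startTime endTime ti) d = d := by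
  intro run
  induction run with
  | nil => intro d _; rfl
  | cons x run ih =>
    intro d hall
    rw [List.foldl_cons]
    have hstep : pvStepR startTime endTime ti d x = d := by
      simp only [pvStepR, hall x (by simp), if_neg hbe]
    rw [hstep]
    exact ih d (fun y hy => hall y (by simp [hy]))

-- after dropping the head's run, every remaining record has a strictly larger bucket
lemma pvMem_dropWhile_gt (startTime ti b : Int) :
    ∀ (rs : List (List Int)),
      rs.Pairwise (fun a c => pvBucket startTime ti (pvKey a) ≤ pvBucket startTime ti (pvKey c)) →
      (∀ x ∈ rs, b ≤ pvBucket startTime ti (pvKey x)) →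
      ∀ x ∈ rs.dropWhile (fun y => pvBucket startTime ti (PySem.List.pyGetD y 2 0) == b),
        b < pvBucket startTime ti (pvKey x) := by
  intro rs
  induction rs with
  | nil => intro _ _ x hx; simp at hx
  | cons a rs ih =>
    intro hpair hge x hx
    rw [List.pairwise_cons] at hpair
    obtain ⟨hhead, htail⟩ := hpair
    rw [List.dropWhile_cons] at hx
    by_cases ha : pvBucket startTime ti (PySem.List.pyGetD a 2 0) == b
    · rw [if_pos ha] at hx
      exact ih htail (fun y hy => hge y (by simp [hy])) x hx
    · rw [if_neg ha] at hx
      have hne : pvBucket startTime ti (pvKey a) ≠ b := by simpa [pvKey] using ha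
      have hga : b < pvBucket startTime ti (pvKey a) :=
        lt_of_le_of_ne (hge a (by simp)) (Ne.symm hne)
      rw [List.mem_cons] at hx
      rcases hx with hx | hx
      · rw [hx]; exact hga
      · exact lt_of_lt_of_le hga (hhead x hx)

-- B's fold over the contiguous-run groups = the per-record bucket step fold
lemma pvGroups_foldl (startTime endTime ti : Int) :
    ∀ (n : Nat) (l : List (List Int)) (d : PySem.Dict Int (List (List Int))),
      l.length ≤ n →
      l.Pairwise (fun a c => pvBucket startTime ti (pvKey a) ≤ pvBucket startTime ti (pvKey c)) →
      (∀ r ∈ l, d.contains (pvBucket startTime ti (pvKey r)) = false) →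
      (pvGroups startTime ti l).foldl
          (fun d bg => if bg.1 < endTime then d.insert bg.1 bg.2 else d) d
        = l.foldl (pvStepR startTime endTime ti) d := by
  intro n
  induction n with
  | zero =>
    intro l d hlen _ _
    have : l = [] := List.eq_nil_of_length_eq_zero (Nat.le_zero.mp hlen)
    subst this; simp [pvGroups]
  | succ n ih =>
    intro l d hlen hpair hfresh
    cases l with
    | nil => simp [pvGroups]
    | cons r rs =>
      rw [List.pairwise_cons] at hpair
      obtain ⟨hhead, htail⟩ := hpair
      set b := pvBucket startTime ti (pvKey r) with hb
      set p := fun x => pvBucket startTime ti (PySem.List.pyGetD x 2 0) == b with hp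
      have hsplit : rs = rs.takeWhile p ++ rs.dropWhile p := (List.takeWhile_append_dropWhile).symm
      have hrunb : ∀ x ∈ r :: rs.takeWhile p, pvBucket startTime ti (pvKey x) = b := by
        intro x hx
        rw [List.mem_cons] at hx
        rcases hx with rfl | hx
        · exact hb.symm
        · have := List.mem_takeWhile_imp hx
          simpa [hp, pvKey] using this
      have hgr : pvGroups startTime ti (r :: rs) =
          (b, r :: rs.takeWhile p) :: pvGroups startTime ti (rs.dropWhile p) := by
        rw [pvGroups]; rfl
      have hrest_mem : ∀ x ∈ rs.dropWhile p, x ∈ rs := fun x hx =>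
        (List.dropWhile_sublist p (l := rs)).mem hx
      have hrest_gt : ∀ x ∈ rs.dropWhile p, b < pvBucket startTime ti (pvKey x) := by
        apply pvMem_dropWhile_gt startTime ti b rs htail
        intro x hx; exact hhead x hx
      -- the head run folds to a single bulk insert (or nothing if b ≥ endTime)
      have hrun : (r :: rs.takeWhile p).foldl (pvStepR startTime endTime ti) d =
          if b < endTime then d.insert b (r :: rs.takeWhile p) else d := by
        by_cases hbe : b < endTime
        · rw [if_pos hbe, List.foldl_cons]
          have hfst : pvStepR startTime endTime ti d r = d.insert b [r] := by
            simp only [pvStepR, ← hb, if_pos hbe]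
            show d.insert b (d.getD b [] ++ [r]) = _
            have hc : d.contains b = false := by rw [hb]; exact hfresh r (by simp)
            rw [PySem.Dict.getD_of_not_contains d [] hc]
            rfl
          rw [hfst, pvRun_fold startTime endTime ti b hbe _ d [r]
            (fun x hx => hrunb x (by simp [hx]))]
          rfl
        · rw [if_neg hbe]
          exact pvRun_fold_skip startTime endTime ti b hbe _ d hrunb
      have hconsapp : r :: rs = (r :: rs.takeWhile p) ++ rs.dropWhile p := by
        rw [List.cons_append]; exact congrArg (r :: ·) hsplit
      rw [hgr, List.foldl_cons, hconsapp, List.foldl_append, hrun]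
      apply ih
      · have h1 : (rs.dropWhile p).length ≤ rs.length := List.length_dropWhile_le _ _
        simp only [List.length_cons] at hlen; omega
      · exact htail.sublist (List.dropWhile_sublist p)
      · intro x hx
        have hne : pvBucket startTime ti (pvKey x) ≠ b := ne_of_gt (hrest_gt x hx)
        by_cases hbe : b < endTime
        · rw [if_pos hbe, PySem.Dict.contains_insert]
          simp only [Bool.or_eq_false_iff, beq_eq_false_iff_ne]
          exact ⟨hne, hfresh x (by simp [hrest_mem x hx])⟩
        · rw [if_neg hbe]; exact hfresh x (by simp [hrest_mem x hx])

-- ===== VERDICT (by name: the statement is the Claim_ definition above) =====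
theorem categorizeTaxiTime_spec : Claim_equal_categorizeTaxiTime := by
  intro lst st et ti _ hpre
  obtain ⟨_, hcase⟩ := hpre
  unfold Spec_categorizeTaxiTime categorizeTaxiTime categorizeTaxiTime_alt
  show ((PySem.List.sorted lst (fun r => pvKey r) false).foldl (pvStepA et ti)
          (PySem.Dict.empty, st)).1.items
      = ((pvGroups st ti ((PySem.List.sorted lst (fun r => pvKey r) false).filter
            (fun r => decide (st < pvKey r)))).foldl
          (fun d bg => if bg.1 < et then d.insert bg.1 bg.2 else d) PySem.Dict.empty).items
  have hpair : (PySem.List.sorted lst (fun r => pvKey r) false).Pairwise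
      (fun a b => pvKey a ≤ pvKey b) := PySem.List.sorted_pairwise lst _
  rw [pvFoldA_filter st et ti _ PySem.Dict.empty hpair]
  rcases hcase with hti | hall
  · have hmemE : ∀ r ∈ (PySem.List.sorted lst (fun r => pvKey r) false).filter
        (fun r => decide (st < pvKey r)), st < pvKey r := fun r hr => by
      have := (List.mem_filter.mp hr).2; simpa using this
    have hpairE := hpair.filter (fun r => decide (st < pvKey r))
    rw [pvFoldA_eq_stepR st et ti hti _ PySem.Dict.empty st hpairE le_rfl (by simp) hmemE hmemE]
    rw [← pvGroups_foldl st et ti _ _ PySem.Dict.empty le_rfl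
      (hpairE.imp (fun h => pvBucket_mono st ti _ _ hti h))
      (fun r _ => by simp)]
  · have hE : (PySem.List.sorted lst (fun r => pvKey r) false).filter
        (fun r => decide (st < pvKey r)) = [] := by
      apply List.filter_eq_nil_iff.mpr
      intro r hr
      have := hall r ((PySem.List.mem_sorted _ _ _ _).mp hr)
      simp [pvKey]; omega
    rw [hE]
    simp [pvGroups]
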